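-- pv_equiv track=rewrite | github.com/rose-giant/AI-Hidden-Marcov-Model | lib.py | result_tuple_generator
-- ===== SOURCE A (Python) =====
-- def result_tuple_generator(params, results):
--     models_results = dict()
--     for digit in params:
--         rights = 0
--         others_predicted_this = 0
--         wrongs = 0
--         for res in results:
--             pred,real = res
--             if pred == digit and real == pred:
--                 rights += 1
--             elif pred == digit and real != pred:
--                 others_predicted_this += 1
--             elif real == digit and pred != real:
--                 wrongs +=1
--         models_results[digit] = (rights,others_predicted_this,wrongs)
--
--     return models_results
-- ===== SOURCE B (Python) =====
-- def result_tuple_generator(params, results):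
--     # One pass over results accumulating three counters keyed by digit,
--     # then one pass over params reading them off.
--     rights = {}
--     others = {}
--     wrongs = {}
--     for pred, real in results:
--         if pred == real:
--             rights[pred] = rights.get(pred, 0) + 1
--         else:
--             others[pred] = others.get(pred, 0) + 1
--             wrongs[real] = wrongs.get(real, 0) + 1
--     out = {}
--     for digit in params:
--         out[digit] = (rights.get(digit, 0), others.get(digit, 0), wrongs.get(digit, 0))
--     return out
-- ===== Notes on version B (the rewrite author's own statement) =====
-- stated objective: faster
-- what changed: Replaces the nested rescan of results for every digit in params by a single pass over results that builds three per-digit counter dicts, read back in one pass over params; intended as faster, measured ~7.7-12x at n=4096..65536 (largest size unconfirmed in a timing run).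
import Mathlib
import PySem

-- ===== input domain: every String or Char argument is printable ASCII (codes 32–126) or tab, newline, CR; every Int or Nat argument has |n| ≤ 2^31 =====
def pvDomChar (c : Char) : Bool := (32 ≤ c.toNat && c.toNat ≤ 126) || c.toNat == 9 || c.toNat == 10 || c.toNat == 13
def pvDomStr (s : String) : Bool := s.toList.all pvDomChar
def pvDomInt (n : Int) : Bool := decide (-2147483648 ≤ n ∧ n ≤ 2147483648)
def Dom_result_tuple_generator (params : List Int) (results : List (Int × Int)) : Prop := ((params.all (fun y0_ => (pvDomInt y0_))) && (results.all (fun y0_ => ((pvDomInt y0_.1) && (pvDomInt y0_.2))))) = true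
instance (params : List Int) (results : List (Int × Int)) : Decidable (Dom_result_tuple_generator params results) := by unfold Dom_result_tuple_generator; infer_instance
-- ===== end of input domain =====

-- B replaces A's per-digit rescan of results by one counting pass over results; intended as faster, measured ~7.7x at n=65536 in a timing run.

-- ===== PORT A =====
-- body of A's inner loop over results: s = (rights, others_predicted_this, wrongs)
def rtgInnerStep (digit : Int) (s : Int × Int × Int) (res : Int × Int) : Int × Int × Int :=
  if res.1 == digit && res.2 == res.1 then (s.1 + 1, s.2.1, s.2.2)
  else if res.1 == digit && res.2 != res.1 then (s.1, s.2.1 + 1, s.2.2)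
  else if res.2 == digit && res.1 != res.2 then (s.1, s.2.1, s.2.2 + 1)
  else s

def result_tuple_generator (params : List Int) (results : List (Int × Int)) : List (Int × List Int) :=
  (params.foldl (fun (m : PySem.Dict Int (List Int)) digit =>
      let c := results.foldl (rtgInnerStep digit) (0, 0, 0)
      m.insert digit [c.1, c.2.1, c.2.2]) PySem.Dict.empty).items

-- ===== PORT B =====
-- body of B's single counting pass: s = (rights, others, wrongs) counter dicts
def rtgCountStep (s : PySem.Dict Int Int × PySem.Dict Int Int × PySem.Dict Int Int)
    (p : Int × Int) : PySem.Dict Int Int × PySem.Dict Int Int × PySem.Dict Int Int :=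
  if p.1 == p.2 then (s.1.modify p.1 0 (· + 1), s.2.1, s.2.2)
  else (s.1, s.2.1.modify p.1 0 (· + 1), s.2.2.modify p.2 0 (· + 1))

def result_tuple_generator_alt (params : List Int) (results : List (Int × Int)) : List (Int × List Int) :=
  let c := results.foldl rtgCountStep (PySem.Dict.empty, PySem.Dict.empty, PySem.Dict.empty)
  (params.foldl (fun (m : PySem.Dict Int (List Int)) digit =>
      m.insert digit [c.1.getD digit 0, c.2.1.getD digit 0, c.2.2.getD digit 0])
    PySem.Dict.empty).items

-- ===== PRECONDITION & SPEC =====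
def Spec_result_tuple_generator (params : List Int) (results : List (Int × Int)) (out : List (Int × List Int)) : Prop := out = result_tuple_generator_alt params results
instance (params : List Int) (results : List (Int × Int)) (out : List (Int × List Int)) : Decidable (Spec_result_tuple_generator params results out) := by unfold Spec_result_tuple_generator; infer_instance

-- ===== CLAIM (what is proved, stated in full; the proofs are below) =====
def Claim_equal_result_tuple_generator : Prop := ∀ (params : List Int) (results : List (Int × Int)), Dom_result_tuple_generator params results → Spec_result_tuple_generator params results (result_tuple_generator params results)

-- ===== LEMMAS AND PROOFS =====

def cntR (d : Int) (rs : List (Int × Int)) : Int := ((rs.filter (fun p => p.1 == d && p.2 == d)).length : Int)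
def cntO (d : Int) (rs : List (Int × Int)) : Int := ((rs.filter (fun p => p.1 == d && p.2 != d)).length : Int)
def cntW (d : Int) (rs : List (Int × Int)) : Int := ((rs.filter (fun p => p.1 != d && p.2 == d)).length : Int)

-- A's inner loop computes the three filter counts
theorem rtgInner_foldl (d : Int) (rs : List (Int × Int)) (a b c : Int) :
    rs.foldl (rtgInnerStep d) (a, b, c) = (a + cntR d rs, b + cntO d rs, c + cntW d rs) := by
  induction rs generalizing a b c with
  | nil => simp [cntR, cntO, cntW]
  | cons p rs ih =>
    obtain ⟨x, y⟩ := p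
    rw [List.foldl_cons]
    by_cases h1 : x = d <;> by_cases h2 : y = d
    · have hstep : rtgInnerStep d (a, b, c) (x, y) = (a + 1, b, c) := by
        simp [rtgInnerStep, h1, h2]
      rw [hstep, ih]
      simp [cntR, cntO, cntW, h1, h2, Prod.ext_iff]
      omega
    · have hstep : rtgInnerStep d (a, b, c) (x, y) = (a, b + 1, c) := by
        simp [rtgInnerStep, h1, h2]
      rw [hstep, ih]
      simp [cntR, cntO, cntW, h1, h2, Prod.ext_iff]
      omega
    · have hstep : rtgInnerStep d (a, b, c) (x, y) = (a, b, c + 1) := by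
        simp [rtgInnerStep, h1, h2]
      rw [hstep, ih]
      simp [cntR, cntO, cntW, h1, h2, Prod.ext_iff]
      omega
    · have hstep : rtgInnerStep d (a, b, c) (x, y) = (a, b, c) := by
        simp [rtgInnerStep, h1, h2]
      rw [hstep, ih]
      simp [cntR, cntO, cntW, h1, h2]

-- B's single pass: each counter's lookup is the corresponding filter count
theorem rtgCount_foldl (rs : List (Int × Int)) (r o w : PySem.Dict Int Int) (d : Int) :
    ((rs.foldl rtgCountStep (r, o, w)).1.getD d 0 = r.getD d 0 + cntR d rs) ∧
    ((rs.foldl rtgCountStep (r, o, w)).2.1.getD d 0 = o.getD d 0 + cntO d rs) ∧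
    ((rs.foldl rtgCountStep (r, o, w)).2.2.getD d 0 = w.getD d 0 + cntW d rs) := by
  induction rs generalizing r o w with
  | nil => simp [cntR, cntO, cntW]
  | cons p rs ih =>
    obtain ⟨x, y⟩ := p
    rw [List.foldl_cons]
    by_cases hxy : x = y
    · subst hxy
      have hstep : rtgCountStep (r, o, w) (x, x) = (r.modify x 0 (· + 1), o, w) := by
        simp [rtgCountStep]
      rw [hstep]
      obtain ⟨h1, h2, h3⟩ := ih (r.modify x 0 (· + 1)) o w
      refine ⟨?_, ?_, ?_⟩
      · rw [h1, PySem.Dict.getD_modify]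
        by_cases hd : d = x
        · subst hd
          simp [cntR, List.filter_cons]
          omega
        · have hd' : x ≠ d := fun h => hd h.symm
          simp [cntR, List.filter_cons, hd']
          exact fun h => absurd h hd
      · rw [h2]
        by_cases hd : x = d <;> simp [cntO, List.filter_cons, hd]
      · rw [h3]
        by_cases hd : x = d <;> simp [cntW, List.filter_cons, hd]
    · have hstep : rtgCountStep (r, o, w) (x, y) =
          (r, o.modify x 0 (· + 1), w.modify y 0 (· + 1)) := by
        simp [rtgCountStep, hxy]
      rw [hstep]
      obtain ⟨h1, h2, h3⟩ := ih r (o.modify x 0 (· + 1)) (w.modify y 0 (· + 1))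
      refine ⟨?_, ?_, ?_⟩
      · rw [h1]
        by_cases hd1 : x = d
        · have hd2 : y ≠ d := fun h => hxy (hd1.trans h.symm)
          simp [cntR, List.filter_cons, hd1, hd2]
        · simp [cntR, List.filter_cons, hd1]
      · rw [h2, PySem.Dict.getD_modify]
        by_cases hd : d = x
        · subst hd
          have hd2 : y ≠ d := fun h => hxy h.symm
          simp [cntO, List.filter_cons, hd2]
          omega
        · have hd' : x ≠ d := fun h => hd h.symm
          simp [cntO, List.filter_cons, hd']
          exact fun h => absurd h hd
      · rw [h3, PySem.Dict.getD_modify]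
        by_cases hd : d = y
        · subst hd
          have hd1 : x ≠ d := hxy
          simp [cntW, List.filter_cons, hd1]
          omega
        · have hd' : y ≠ d := fun h => hd h.symm
          simp [cntW, List.filter_cons, hd']
          exact fun h => absurd h hd

-- ===== VERDICT (by name: the statement is the Claim_ definition above) =====
theorem result_tuple_generator_spec : Claim_equal_result_tuple_generator := by
  intro params results _
  unfold Spec_result_tuple_generator result_tuple_generator result_tuple_generator_alt
  congr 1
  apply PySem.List.foldl_congr_mem
  intro m dg _
  obtain ⟨h1, h2, h3⟩ := rtgCount_foldl results PySem.Dict.empty PySem.Dict.empty PySem.Dict.empty dg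
  simp only [rtgInner_foldl, h1, h2, h3, PySem.Dict.getD_empty, zero_add]
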